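-- pv_equiv track=rewrite | github.com/oleksiiberezhnyi/BeetrootAcademy | Trees_Part1/split_function.py | my_splits_bool
-- ===== SOURCE A (Python) =====
-- def my_splits_bool(s: str):
--     bool_operator = {'/', '+', '-', '(', ')'}
--     bool_string = s.replace('or', '/')
--     bool_string = bool_string.replace('and', '+')
--     bool_string = bool_string.replace('not', '-')
--     res = []
--     math_index = []
--     n = 0
--     for i in range(len(bool_string)):
--         if bool_string[i] in bool_operator:
--             math_index.append(i)
--     for i in math_index:
--         res.append(bool_string[n:i].replace(' ', ''))
--         res.append(bool_string[i])
--         n = i + 1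
--         if i == math_index[-1]:
--             res.append(bool_string[n:])
--     for i in range(len(res)):
--         if res[i] == '/':
--             res[i] = 'or'
--         elif res[i] == '+':
--             res[i] = 'and'
--         elif res[i] == '-':
--             res[i] = 'not'
--     res = list(filter(lambda i: i != '', res))
--     return res
-- ===== SOURCE B (Python) =====
-- def my_splits_bool(s: str):
--     t = s.replace('or', '/').replace('and', '+').replace('not', '-')
--     if not any(ch in NAMES for ch in t):
--         return []  # no operator anywhere: not a compound expression, nothing to split
--     return [tok for tok in _tokens(t) if tok]
--
--
-- NAMES = {'/': 'or', '+': 'and', '-': 'not', '(': '(', ')': ')'}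
--
--
-- def _tokens(t):
--     # operand before the first operator, normalized; then recurse on the rest
--     for i, ch in enumerate(t):
--         if ch in NAMES:
--             return [t[:i].replace(' ', ''), NAMES[ch]] + _tokens(t[i + 1:])
--     return [t]
-- ===== Notes on version B (the rewrite author's own statement) =====
-- stated objective: simpler
-- what changed: A collects operator indices in one pass, then slices the sentinel string between consecutive indices in a second pass, remaps operator symbols in a third and filters; B checks once whether any operator occurs (none: nothing to split) and otherwise tokenizes by recursion on the string: emit the normalized operand before the first operator and the operator name, then recurse on the rest.
import Mathlib
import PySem

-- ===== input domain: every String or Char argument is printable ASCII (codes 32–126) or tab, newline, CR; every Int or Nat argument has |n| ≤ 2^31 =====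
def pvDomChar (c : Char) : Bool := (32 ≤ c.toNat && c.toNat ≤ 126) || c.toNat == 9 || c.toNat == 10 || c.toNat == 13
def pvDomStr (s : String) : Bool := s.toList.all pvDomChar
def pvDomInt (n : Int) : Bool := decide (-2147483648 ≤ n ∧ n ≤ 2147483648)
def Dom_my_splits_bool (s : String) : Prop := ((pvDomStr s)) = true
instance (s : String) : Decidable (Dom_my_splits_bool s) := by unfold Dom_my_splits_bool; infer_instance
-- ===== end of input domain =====

-- B checks once for an operator (none: nothing to split) and otherwise tokenizes by recursion on the string
-- (operand before the first operator, the operator name, recurse on the rest) instead of A's three passes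
-- (collect operator indices, slice between consecutive indices, remap in place); the return values are proved equal.

-- ===== PORT A =====
-- the three sentinel replacements, shared verbatim by both Pythons
def pvSentinel (s : String) : List Char :=
  PySem.Chars.replace (PySem.Chars.replace (PySem.Chars.replace s.toList ['o','r'] ['/']) ['a','n','d'] ['+']) ['n','o','t'] ['-']

def pvBoolOperator : List Char := PySem.Set.ofList ['/', '+', '-', '(', ')']

-- first loop: collect the indices of operator characters
def pvMathIndex (bs : List Char) : List Int :=
  (PySem.List.pyRange 0 (bs.length : Int) 1).foldl
    (fun acc i => if pvBoolOperator.contains (PySem.List.pyGetD bs i ' ') then acc ++ [i] else acc) []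

-- body of A's second loop; state = (res, n); `last` = math_index[-1]
def pvAStep (bs : List Char) (last : Int) (st : List String × Int) (i : Int) : List String × Int :=
  let res := st.1 ++ [String.ofList (PySem.Chars.replace (PySem.List.slice bs (some st.2) (some i)) [' '] [])]
  let res := res ++ [String.ofList [PySem.List.pyGetD bs i ' ']]
  let n := i + 1
  let res := if i = last then res ++ [String.ofList (PySem.List.slice bs (some n) none)] else res
  (res, n)

-- body of A's third loop
def pvRemap (r : String) : String :=
  if r = "/" then "or" else if r = "+" then "and" else if r = "-" then "not" else r

def my_splits_bool (s : String) : List String :=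
  let bs := pvSentinel s
  let mi := pvMathIndex bs
  let res := (mi.foldl (pvAStep bs (PySem.List.pyGetD mi (-1) 0)) ([], 0)).1
  (res.map pvRemap).filter (fun r => decide (r ≠ ""))

-- ===== PORT B =====
def pvNames : PySem.Dict Char String :=
  PySem.Dict.ofList [('/', "or"), ('+', "and"), ('-', "not"), ('(', "("), (')', ")")]

-- B's `for i, ch in enumerate(t): if ch in NAMES: …`: index and char of the first operator, none if there is none
def pvFindOp : List Char → Option (Nat × Char)
  | [] => none
  | c :: r => if (PySem.Dict.get? pvNames c).isSome then some (0, c)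
              else (pvFindOp r).map (fun p => (p.1 + 1, p.2))

-- termination helper for pvTokens (cited in decreasing_by)
lemma pvFindOp_lt : ∀ (t : List Char) (i : Nat) (c : Char), pvFindOp t = some (i, c) → i < t.length := by
  intro t
  induction t with
  | nil => intro i c h; simp [pvFindOp] at h
  | cons a r ih =>
    intro i c h
    simp only [pvFindOp] at h
    split_ifs at h with hop
    · rw [Option.some_inj] at h
      injection h with h1 h2
      simp only [List.length_cons]
      omega
    · cases hr : pvFindOp r with
      | none => rw [hr] at h; simp at h
      | some p =>
        rw [hr] at h
        simp only [Option.map_some, Option.some.injEq, Prod.mk.injEq] at h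
        have := ih p.1 p.2 (by rw [hr])
        simp only [List.length_cons]
        omega

-- B's recursive tokenizer; t[:i] and t[i+1:] are take/drop, exact here since i comes from enumerate (i ≥ 0)
def pvTokens (t : List Char) : List String :=
  match h : pvFindOp t with
  | none => [String.ofList t]
  | some (i, c) =>
      String.ofList (PySem.Chars.replace (t.take i) [' '] []) ::
      PySem.Dict.getD pvNames c "" ::
      pvTokens (t.drop (i + 1))
termination_by t.length
decreasing_by
  have := pvFindOp_lt t i c h
  simp only [List.length_drop]
  omega

def my_splits_bool_alt (s : String) : List String :=
  let t := pvSentinel s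
  if (t.any (fun ch => (PySem.Dict.get? pvNames ch).isSome)) = false then []
  else (pvTokens t).filter (fun tok => decide (tok ≠ ""))

-- ===== PRECONDITION & SPEC =====
def Spec_my_splits_bool (s : String) (out : List String) : Prop := out = my_splits_bool_alt s
instance (s : String) (out : List String) : Decidable (Spec_my_splits_bool s out) := by unfold Spec_my_splits_bool; infer_instance

-- ===== CLAIM (what is proved, stated in full; the proofs are below) =====
def Claim_equal_my_splits_bool : Prop := ∀ (s : String), Dom_my_splits_bool s → Spec_my_splits_bool s (my_splits_bool s)

-- ===== LEMMAS AND PROOFS =====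

-- the operator test
def pvOp (c : Char) : Bool := pvBoolOperator.contains c

-- both ports' cores on the sentinel character list
def pvAcore (l : List Char) : List String :=
  let mi := pvMathIndex l
  ((((mi.foldl (pvAStep l (PySem.List.pyGetD mi (-1) 0)) ([], 0)).1).map pvRemap).filter (fun r => decide (r ≠ "")))

def pvBtoks (l : List Char) : List String :=
  (pvTokens l).filter (fun r => decide (r ≠ ""))

lemma pvA_eq_core (s : String) : my_splits_bool s = pvAcore (pvSentinel s) := rfl

-- s.replace(' ', '') removes exactly the spaces
lemma pv_replace_go (fuel : Nat) : ∀ (l acc : List Char), l.length ≤ fuel →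
    PySem.Chars.replace.go [' '] [] fuel l acc = acc.reverse ++ l.filter (· ≠ ' ') := by
  induction fuel with
  | zero => intro l acc h; cases l with
    | nil => simp [PySem.Chars.replace.go]
    | cons c t => simp at h
  | succ n ih => intro l acc h; cases l with
    | nil => simp [PySem.Chars.replace.go]
    | cons c t =>
      simp only [PySem.Chars.replace.go, List.isPrefixOf]
      by_cases hc : c = ' '
      · subst hc
        simp only [BEq.rfl, Bool.true_and, List.isPrefixOf, if_pos]
        rw [show ([' '] : List Char).length = 1 from rfl]
        simp only [List.drop_one, List.tail_cons, List.reverse_nil, List.nil_append]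
        rw [ih t acc (by simpa using h)]
        simp
      · rw [if_neg (by simp; exact fun h => hc h.symm)]
        rw [ih t (c :: acc) (by simpa using h)]
        simp [hc]

lemma pv_strip_eq (cs : List Char) :
    PySem.Chars.replace cs [' '] [] = cs.filter (· ≠ ' ') := by
  simp only [PySem.Chars.replace, List.isEmpty]
  rw [pv_replace_go cs.length cs [] le_rfl]
  simp

-- the dict lookup agrees with the operator test and names the operator via pvRemap
lemma pv_names_get? (ch : Char) :
    PySem.Dict.get? pvNames ch =
      if pvOp ch = true then some (pvRemap (String.ofList [ch])) else none := by
  by_cases h1 : ch = '/'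
  · subst h1; decide
  by_cases h2 : ch = '+'
  · subst h2; decide
  by_cases h3 : ch = '-'
  · subst h3; decide
  by_cases h4 : ch = '('
  · subst h4; decide
  by_cases h5 : ch = ')'
  · subst h5; decide
  have hop : pvOp ch = false := by
    simp [pvOp, pvBoolOperator, PySem.Set.ofList, PySem.Set.add, h1, h2, h3, h4, h5]
  rw [hop]
  simp only [Bool.false_eq_true, if_false]
  have e1 : ('/' == ch) = false := by simp; exact fun h => h1 h.symm
  have e2 : ('+' == ch) = false := by simp; exact fun h => h2 h.symm
  have e3 : ('-' == ch) = false := by simp; exact fun h => h3 h.symm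
  have e4 : ('(' == ch) = false := by simp; exact fun h => h4 h.symm
  have e5 : (')' == ch) = false := by simp; exact fun h => h5 h.symm
  simp [pvNames, PySem.Dict.ofList, PySem.Dict.get?, PySem.Dict.update, PySem.Dict.empty,
    PySem.Dict.insert, PySem.Dict.contains, List.find?, e1, e2, e3, e4, e5]

lemma pv_names_isSome (ch : Char) : (PySem.Dict.get? pvNames ch).isSome = pvOp ch := by
  rw [pv_names_get?]
  by_cases h : pvOp ch = true <;> simp [h]

lemma pv_names_getD (c : Char) (hc : pvOp c = true) :
    PySem.Dict.getD pvNames c "" = pvRemap (String.ofList [c]) := by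
  simp [PySem.Dict.getD, pv_names_get?, hc]

lemma pv_mathIndex_eq (bs : List Char) :
    pvMathIndex bs = (PySem.List.pyRange 0 (bs.length : Int) 1).filter
      (fun i => pvOp (PySem.List.pyGetD bs i ' ')) := by
  unfold pvMathIndex
  rw [PySem.List.foldl_append_if_eq_filter
    (fun i => pvBoolOperator.contains (PySem.List.pyGetD bs i ' '))]
  simp only [List.nil_append]
  rfl

lemma pv_mathIndex_nil_iff (bs : List Char) :
    pvMathIndex bs = [] ↔ ∀ c ∈ bs, pvOp c = false := by
  rw [pv_mathIndex_eq, List.filter_eq_nil_iff]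
  constructor
  · intro h c hc
    obtain ⟨j, hj, rfl⟩ := List.getElem_of_mem hc
    have := h (j : Int) (by rw [PySem.List.mem_pyRange_one]; omega)
    simpa [PySem.List.pyGetD_natCast, List.getD_eq_getElem?_getD, List.getElem?_eq_getElem hj] using this
  · intro h i hi
    rw [PySem.List.mem_pyRange_one] at hi
    have hlt : i.toNat < bs.length := by omega
    rw [PySem.List.pyGetD_eq_getElem bs ' ' (by omega) (by omega)]
    simp [h _ (bs.getElem_mem hlt)]

-- positional helpers on u ++ c :: v
lemma pv_drop_eq (u : List Char) (c : Char) (v : List Char) (t : Nat) :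
    (u ++ c :: v).drop (u.length + 1 + t) = v.drop t := by
  rw [List.drop_append]
  rw [List.drop_eq_nil_of_le (by omega)]
  have h : u.length + 1 + t - u.length = t + 1 := by omega
  rw [h, List.drop_succ_cons, List.nil_append]

lemma pv_pyGetD_mid (u : List Char) (c : Char) (v : List Char) :
    PySem.List.pyGetD (u ++ c :: v) (u.length : Int) ' ' = c := by
  rw [PySem.List.pyGetD_eq_getElem _ ' ' (by positivity) (by simp)]
  simp only [Int.toNat_natCast]
  rw [List.getElem_append_right le_rfl]
  simp

lemma pv_pyGetD_shift (u : List Char) (c : Char) (v : List Char) (a : Int)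
    (h0 : 0 ≤ a) (h1 : a < (v.length : Int)) :
    PySem.List.pyGetD (u ++ c :: v) (a + ((u.length : Int) + 1)) ' '
      = PySem.List.pyGetD v a ' ' := by
  rw [PySem.List.pyGetD_eq_getElem _ ' ' (by omega) (by simp; omega),
      PySem.List.pyGetD_eq_getElem _ ' ' h0 (by omega)]
  rw [List.getElem_append_right (by omega)]
  have h : (a + ((u.length : Int) + 1)).toNat - u.length = a.toNat + 1 := by omega
  simp only [h]
  rw [List.getElem_cons_succ]

lemma pv_mathIndex_split (u : List Char) (c : Char) (v : List Char)
    (hu : ∀ x ∈ u, pvOp x = false) (hc : pvOp c = true) :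
    pvMathIndex (u ++ c :: v) =
      (u.length : Int) :: (pvMathIndex v).map (· + ((u.length : Int) + 1)) := by
  have hlen : ((u ++ c :: v).length : Int) = (u.length : Int) + 1 + (v.length : Int) := by
    simp
    push_cast
    ring
  rw [pv_mathIndex_eq, hlen]
  rw [PySem.List.pyRange_one_append 0 (u.length : Int) _ (by positivity) (by omega),
      PySem.List.pyRange_one_append (u.length : Int) ((u.length : Int) + 1) _ (by omega) (by omega),
      PySem.List.pyRange_one_singleton]
  rw [List.filter_append, List.filter_append]
  have h1 : (PySem.List.pyRange 0 (u.length : Int) 1).filter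
      (fun i => pvOp (PySem.List.pyGetD (u ++ c :: v) i ' ')) = [] := by
    rw [List.filter_eq_nil_iff]
    intro i hi
    rw [PySem.List.mem_pyRange_one] at hi
    have hlt : i.toNat < u.length := by omega
    rw [PySem.List.pyGetD_eq_getElem _ ' ' (by omega) (by simp; omega)]
    rw [List.getElem_append_left hlt]
    simp [hu _ (u.getElem_mem hlt)]
  have h2 : PySem.List.pyGetD (u ++ c :: v) ((u.length : Int)) ' ' = c := pv_pyGetD_mid u c v
  have h3 : (PySem.List.pyRange ((u.length : Int) + 1) ((u.length : Int) + 1 + (v.length : Int)) 1).filter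
      (fun i => pvOp (PySem.List.pyGetD (u ++ c :: v) i ' '))
      = (pvMathIndex v).map (· + ((u.length : Int) + 1)) := by
    rw [pv_mathIndex_eq]
    have e1 : PySem.List.pyRange ((u.length : Int) + 1) ((u.length : Int) + 1 + (v.length : Int)) 1
        = (List.range v.length).map (fun (j : Nat) => ((j : Int)) + ((u.length : Int) + 1)) := by
      rw [PySem.List.pyRange_one]
      have h : ((u.length : Int) + 1 + (v.length : Int) - ((u.length : Int) + 1)).toNat = v.length := by
        omega
      rw [h]
      apply List.map_congr_left
      intro j _
      ring
    have e2 : PySem.List.pyRange 0 ((v.length : Int)) 1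
        = (List.range v.length).map (fun (j : Nat) => ((j : Int))) := by
      rw [PySem.List.pyRange_one]
      have h : ((v.length : Int) - 0).toNat = v.length := by omega
      rw [h]
      apply List.map_congr_left
      intro j _
      omega
    rw [e1, e2, List.filter_map, List.filter_map, List.map_map]
    have hfe : ∀ j ∈ List.range v.length,
        ((fun i => pvOp (PySem.List.pyGetD (u ++ c :: v) i ' ')) ∘
          (fun (j : Nat) => ((j : Int)) + ((u.length : Int) + 1))) j
        = ((fun i => pvOp (PySem.List.pyGetD v i ' ')) ∘ (fun (j : Nat) => ((j : Int)))) j := by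
      intro j hj
      simp only [List.mem_range] at hj
      simp only [Function.comp_apply]
      rw [pv_pyGetD_shift u c v (j : Int) (by positivity) (by omega)]
    rw [List.filter_congr hfe]
    rfl
  rw [h1, h3]
  simp [List.filter_cons, h2, hc]

-- A's inner fold only appends to res
lemma pv_afold_prefix (bs : List Char) (last : Int) (idxs : List Int) :
    ∀ (r0 r : List String) (n : Int),
      List.foldl (pvAStep bs last) (r0 ++ r, n) idxs =
        (r0 ++ (List.foldl (pvAStep bs last) (r, n) idxs).1,
         (List.foldl (pvAStep bs last) (r, n) idxs).2) := by
  induction idxs with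
  | nil => intro r0 r n; simp
  | cons a t ih =>
    intro r0 r n
    simp only [List.foldl_cons]
    have hstep : pvAStep bs last (r0 ++ r, n) a =
        (r0 ++ (pvAStep bs last (r, n) a).1, (pvAStep bs last (r, n) a).2) := by
      simp only [pvAStep]
      split_ifs <;> simp
    rw [hstep]
    rw [show (r0 ++ (pvAStep bs last (r, n) a).1, (pvAStep bs last (r, n) a).2) =
      ((r0 ++ (pvAStep bs last (r, n) a).1, (pvAStep bs last (r, n) a).2) : List String × Int) from rfl]
    rw [ih r0 (pvAStep bs last (r, n) a).1 (pvAStep bs last (r, n) a).2]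

-- shifting A's fold from u ++ c :: v down to v
lemma pv_afold_shift (u : List Char) (c : Char) (v : List Char) (Lv : Int) :
    ∀ (idxs : List Int), (∀ a ∈ idxs, 0 ≤ a ∧ a < (v.length : Int)) →
    ∀ (r : List String) (m : Int), 0 ≤ m →
      List.foldl (pvAStep (u ++ c :: v) (((u.length : Int) + 1) + Lv)) (r, ((u.length : Int) + 1) + m)
        (idxs.map (· + ((u.length : Int) + 1)))
      = (r ++ (List.foldl (pvAStep v Lv) ([], m) idxs).1,
         ((u.length : Int) + 1) + (List.foldl (pvAStep v Lv) ([], m) idxs).2) := by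
  intro idxs
  induction idxs with
  | nil => intro _ r m _; simp
  | cons a t ih =>
    intro hbound r m hm
    obtain ⟨ha0, hav⟩ := hbound a (by simp)
    set k : Int := (u.length : Int) + 1 with hk
    have hstep : pvAStep (u ++ c :: v) (k + Lv) (r, k + m) (a + k)
        = (r ++ (pvAStep v Lv ([], m) a).1, k + (pvAStep v Lv ([], m) a).2) := by
      have hslice : PySem.List.slice (u ++ c :: v) (some (k + m)) (some (a + k))
          = PySem.List.slice v (some m) (some a) := by
        rw [PySem.List.slice_toNat _ (by omega) (by omega),
            PySem.List.slice_toNat _ hm ha0]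
        have hd : (k + m).toNat = u.length + 1 + m.toNat := by simp [hk]; omega
        rw [hd, pv_drop_eq]
        congr 1
        omega
      have hget : PySem.List.pyGetD (u ++ c :: v) (a + k) ' ' = PySem.List.pyGetD v a ' ' :=
        pv_pyGetD_shift u c v a ha0 hav
      have htail : PySem.List.slice (u ++ c :: v) (some (a + k + 1)) none
          = PySem.List.slice v (some (a + 1)) none := by
        rw [PySem.List.slice_from _ (by omega), PySem.List.slice_from _ (by omega)]
        have hd : (a + k + 1).toNat = u.length + 1 + (a + 1).toNat := by simp [hk]; omega
        rw [hd, pv_drop_eq]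
      simp only [pvAStep, hslice, hget, htail]
      by_cases hcnd : a = Lv
      · rw [if_pos (by omega), if_pos hcnd]
        simp only [Prod.mk.injEq]
        refine ⟨by simp, by omega⟩
      · rw [if_neg (by omega), if_neg hcnd]
        simp only [Prod.mk.injEq]
        refine ⟨by simp, by omega⟩
    simp only [List.map_cons, List.foldl_cons]
    rw [hstep]
    have hstep2 : (pvAStep v Lv ([], m) a).2 = a + 1 := by simp [pvAStep]
    have hbt : ∀ b ∈ t, 0 ≤ b ∧ b < (v.length : Int) := fun b hb => hbound b (by simp [hb])
    rw [ih hbt (r ++ (pvAStep v Lv ([], m) a).1) (pvAStep v Lv ([], m) a).2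
        (by rw [hstep2]; omega)]
    have hpre := pv_afold_prefix v Lv t (pvAStep v Lv ([], m) a).1 [] (pvAStep v Lv ([], m) a).2
    simp only [List.append_nil] at hpre
    rw [show ((pvAStep v Lv ([], m) a).1, (pvAStep v Lv ([], m) a).2)
        = pvAStep v Lv ([], m) a from rfl] at hpre
    rw [hpre]
    simp

-- pvFindOp characterisations
lemma pv_findOp_none_iff (t : List Char) :
    pvFindOp t = none ↔ ∀ c ∈ t, pvOp c = false := by
  induction t with
  | nil => simp [pvFindOp]
  | cons a r ih =>
    simp only [pvFindOp, pv_names_isSome]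
    by_cases ha : pvOp a = true
    · simp [ha]
    · have ha' : pvOp a = false := by simpa using ha
      simp [ha', ih]

lemma pv_findOp_split (u : List Char) (c : Char) (v : List Char)
    (hu : ∀ x ∈ u, pvOp x = false) (hc : pvOp c = true) :
    pvFindOp (u ++ c :: v) = some (u.length, c) := by
  induction u with
  | nil => simp [pvFindOp, pv_names_isSome, hc]
  | cons a r ih =>
    have ha : pvOp a = false := hu a (by simp)
    simp only [List.cons_append, pvFindOp, pv_names_isSome, ha]
    rw [ih (fun x hx => hu x (by simp [hx]))]
    simp

-- custom equation lemmas for the well-founded pvTokens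
lemma pvTokens_none (t : List Char) (h : pvFindOp t = none) :
    pvTokens t = [String.ofList t] := by
  rw [pvTokens]
  split <;> simp_all

lemma pvTokens_some (t : List Char) (i : Nat) (c : Char) (h : pvFindOp t = some (i, c)) :
    pvTokens t = String.ofList (PySem.Chars.replace (t.take i) [' '] []) ::
      PySem.Dict.getD pvNames c "" :: pvTokens (t.drop (i + 1)) := by
  rw [pvTokens]
  split <;> simp_all

-- a token made of non-operator characters is not remapped and is "" only if empty
lemma pv_remap_of_no_op (w : List Char) (h : ∀ x ∈ w, pvOp x = false) :
    pvRemap (String.ofList w) = String.ofList w := by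
  have hne : ∀ (c : Char), pvOp c = true → String.ofList w ≠ String.ofList [c] := by
    intro c hc heq
    have : w = [c] := String.ofList_inj.mp heq
    subst this
    have := h c (by simp)
    rw [this] at hc; exact absurd hc (by simp)
  simp only [pvRemap]
  rw [if_neg (by simpa using hne '/' (by decide)),
      if_neg (by simpa using hne '+' (by decide)),
      if_neg (by simpa using hne '-' (by decide))]

lemma pv_ofList_ne_empty_iff (w : List Char) : (String.ofList w ≠ "") ↔ w ≠ [] := by
  constructor
  · intro h hw; subst hw; exact h rfl
  · intro h hc
    exact h (String.ofList_inj.mp hc)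

lemma pv_opname_ne_empty (c : Char) (hc : pvOp c = true) : pvRemap (String.ofList [c]) ≠ "" := by
  have : c ∈ pvBoolOperator := by
    have := hc
    simpa [pvOp, List.contains_iff_exists_mem_beq] using this
  have hmem : c ∈ (['/', '+', '-', '(', ')'] : List Char) := by
    simpa [pvBoolOperator, PySem.Set.mem_ofList] using this
  fin_cases hmem <;> decide

-- the interleaved prefix [segment, operator] after remap+filter
lemma pv_prefix_eq (u : List Char) (c : Char) (hu : ∀ x ∈ u, pvOp x = false) (hc : pvOp c = true) :
    (([String.ofList (u.filter (· ≠ ' ')), String.ofList [c]].map pvRemap).filter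
      (fun r => decide (r ≠ "")))
    = (if u.filter (· ≠ ' ') ≠ [] then [String.ofList (u.filter (· ≠ ' '))] else [])
        ++ [pvRemap (String.ofList [c])] := by
  have hfu : ∀ x ∈ u.filter (· ≠ ' '), pvOp x = false :=
    fun x hx => hu x (List.mem_of_mem_filter hx)
  simp only [List.map_cons, List.map_nil, List.filter_cons, List.filter_nil]
  rw [pv_remap_of_no_op _ hfu]
  by_cases hf : u.filter (· ≠ ' ') = []
  · rw [hf]
    simp [pv_opname_ne_empty c hc]
  · rw [if_pos hf]
    have h1 : (String.ofList (u.filter (· ≠ ' ')) ≠ "") := (pv_ofList_ne_empty_iff _).mpr hf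
    simp [h1, pv_opname_ne_empty c hc]
    simpa [List.filter_eq_nil_iff] using hf

-- last element of math_index, through pyGetD xs (-1)
lemma pv_last_cons {a : Int} {t : List Int} (h : t ≠ []) :
    PySem.List.pyGetD (a :: t) (-1) 0 = PySem.List.pyGetD t (-1) 0 := by
  rw [PySem.List.pyGetD_neg_one (a :: t) 0 (by simp),
      PySem.List.pyGetD_neg_one t 0 h]
  exact List.getLast_cons h

lemma pv_last_map_add (t : List Int) (h : t ≠ []) (k : Int) :
    PySem.List.pyGetD (t.map (· + k)) (-1) 0 = PySem.List.pyGetD t (-1) 0 + k := by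
  rw [PySem.List.pyGetD_neg_one (t.map (· + k)) 0 (by simpa using h),
      PySem.List.pyGetD_neg_one t 0 h]
  rw [List.getLast_map]

lemma pv_mathIndex_bounds (v : List Char) : ∀ a ∈ pvMathIndex v, 0 ≤ a ∧ a < (v.length : Int) := by
  intro a ha
  rw [pv_mathIndex_eq] at ha
  have := List.mem_of_mem_filter ha
  rw [PySem.List.mem_pyRange_one] at this
  omega

-- THE MAIN LEMMA: both cores agree on every sentinel list that contains an operator
theorem pv_core_eq : ∀ (l : List Char), (∃ c ∈ l, pvOp c = true) → pvAcore l = pvBtoks l := by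
  intro l
  induction hn : l.length using Nat.strong_induction_on generalizing l with
  | _ n ih =>
  subst hn
  intro hex
  -- split at the first operator
  set p : Char → Bool := fun c => !pvOp c with hp
  set u := l.takeWhile p with hu
  set d := l.dropWhile p with hd
  have hud : u ++ d = l := List.takeWhile_append_dropWhile
  have hdne : d ≠ [] := by
    intro hnil
    obtain ⟨c0, hc0l, hc0⟩ := hex
    have : ∀ x ∈ l, p x = true := by
      intro x hx
      rw [← hud, hnil, List.append_nil] at hx
      exact List.mem_takeWhile_imp hx
    have := this c0 hc0l
    simp [hp, hc0] at this
  obtain ⟨c, v, hdcv⟩ := List.exists_cons_of_ne_nil hdne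
  have hdne' : List.dropWhile p l ≠ [] := by rw [← hd]; exact hdne
  have hc : pvOp c = true := by
    have hh := List.head_dropWhile_not p hdne'
    have hh2 : (List.dropWhile p l).head hdne' = c := by
      have hsome : (List.dropWhile p l).head? = some c := by rw [← hd, hdcv]; rfl
      rw [List.head?_eq_head hdne'] at hsome
      exact Option.some.inj hsome
    rw [hh2] at hh
    simp [hp] at hh
    exact hh
  have huop : ∀ x ∈ u, pvOp x = false := by
    intro x hx
    have := List.mem_takeWhile_imp (hu ▸ hx)
    simp [hp] at this
    exact this
  have hl : l = u ++ c :: v := by rw [← hud, hdcv]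
  have hvlen : v.length < l.length := by rw [hl]; simp; omega
  set k : Int := (u.length : Int) + 1 with hk
  have hmi : pvMathIndex l = (u.length : Int) :: (pvMathIndex v).map (· + k) := by
    rw [hl]; exact pv_mathIndex_split u c v huop hc
  -- shared computations at the first operator
  have hslice0 : PySem.List.slice l (some 0) (some (u.length : Int)) = u := by
    rw [hl, PySem.List.slice_toNat _ le_rfl (by positivity)]
    simp
  have hgetc : PySem.List.pyGetD l (u.length : Int) ' ' = c := by
    rw [hl]; exact pv_pyGetD_mid u c v
  have hdropk : PySem.List.slice l (some k) none = v := by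
    rw [hl, PySem.List.slice_from _ (by omega)]
    have h2 : k.toNat = u.length + 1 + 0 := by simp [hk]
    rw [h2, pv_drop_eq]
    simp
  -- B's first step
  have hfind : pvFindOp l = some (u.length, c) := by
    rw [hl]; exact pv_findOp_split u c v huop hc
  have htake : l.take u.length = u := by rw [hl]; exact List.take_left
  have hdrop : l.drop (u.length + 1) = v := by
    rw [hl]
    have := pv_drop_eq u c v 0
    simpa using this
  have hBtok : pvTokens l = String.ofList (u.filter (· ≠ ' ')) ::
      pvRemap (String.ofList [c]) :: pvTokens v := by
    rw [pvTokens_some l u.length c hfind, htake, hdrop, pv_strip_eq, pv_names_getD c hc]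
  by_cases hv : pvMathIndex v = []
  · -- exactly one operator: tail is appended raw
    have hvop : ∀ x ∈ v, pvOp x = false := (pv_mathIndex_nil_iff v).mp hv
    have hlast : PySem.List.pyGetD [((u.length : Int))] (-1) 0 = (u.length : Int) := by
      rw [PySem.List.pyGetD_neg_one _ _ (by simp)]
      simp
    rw [pvAcore]
    simp only [hmi, hv, List.map_nil, List.foldl_cons, List.foldl_nil, hlast]
    have hstep : pvAStep l (u.length : Int) ([], 0) (u.length : Int)
        = ([String.ofList (u.filter (· ≠ ' ')), String.ofList [c], String.ofList v],
           (u.length : Int) + 1) := by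
      simp only [pvAStep, hslice0, hgetc, if_true]
      rw [show (u.length : Int) + 1 = k from hk.symm, hdropk, pv_strip_eq]
      simp
    rw [hstep]
    -- B side: no further operator, so tokens(v) = [v]
    have htokv : pvTokens v = [String.ofList v] :=
      pvTokens_none v ((pv_findOp_none_iff v).mpr hvop)
    rw [pvBtoks, hBtok, htokv]
    -- the mapped A-list IS B's token list
    have hfu : ∀ x ∈ u.filter (fun x => decide (x ≠ ' ')), pvOp x = false :=
      fun x hx => huop x (List.mem_of_mem_filter hx)
    rw [List.map_cons, List.map_cons, List.map_cons, List.map_nil,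
        pv_remap_of_no_op _ hfu, pv_remap_of_no_op v hvop]
  · -- more operators follow: recurse on v
    have hvlast0 : 0 ≤ PySem.List.pyGetD (pvMathIndex v) (-1) 0 := by
      rw [PySem.List.pyGetD_neg_one _ 0 hv]
      exact (pv_mathIndex_bounds v _ (List.getLast_mem hv)).1
    set Lv : Int := PySem.List.pyGetD (pvMathIndex v) (-1) 0 with hLv
    have hlast : PySem.List.pyGetD ((u.length : Int) :: (pvMathIndex v).map (· + k)) (-1) 0
        = k + Lv := by
      rw [pv_last_cons (by simpa using hv), pv_last_map_add _ hv, hLv]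
      ring
    rw [pvAcore]
    simp only [hmi, hlast, List.foldl_cons]
    have hstep : pvAStep l (k + Lv) ([], 0) (u.length : Int)
        = ([String.ofList (u.filter (· ≠ ' ')), String.ofList [c]], k) := by
      simp only [pvAStep, hslice0, hgetc]
      rw [if_neg (by rw [hk]; omega), pv_strip_eq]
      simp [hk]
    rw [hstep]
    have hshift := pv_afold_shift u c v Lv (pvMathIndex v) (pv_mathIndex_bounds v)
      [String.ofList (u.filter (· ≠ ' ')), String.ofList [c]] 0 le_rfl
    rw [← hk, ← hl] at hshift
    simp only [add_zero] at hshift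
    rw [hshift]
    simp only [List.map_append, List.filter_append]
    have hArec : ((List.foldl (pvAStep v Lv) ([], 0) (pvMathIndex v)).1.map pvRemap).filter
        (fun r => decide (r ≠ "")) = pvAcore v := by
      rw [pvAcore]
    rw [hArec, pv_prefix_eq u c huop hc]
    -- B side
    have hvex : ∃ x ∈ v, pvOp x = true := by
      by_contra hno
      push_neg at hno
      exact hv ((pv_mathIndex_nil_iff v).mpr (fun x hx => by
        have := hno x hx
        exact Bool.eq_false_iff.mpr this))
    rw [pvBtoks, hBtok]
    simp only [List.filter_cons]
    have hBrec : (pvTokens v).filter (fun r => decide (r ≠ "")) = pvBtoks v := rfl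
    rw [hBrec, ← ih v.length hvlen v rfl hvex]
    have hop' := pv_opname_ne_empty c hc
    by_cases hf : u.filter (· ≠ ' ') = []
    · rw [hf]
      simp [hop']
    · have h1 : (String.ofList (u.filter (fun x => decide (x ≠ ' '))) ≠ "") :=
        (pv_ofList_ne_empty_iff _).mpr hf
      have hex' : ∃ x ∈ u, ¬x = ' ' := by
        rcases List.exists_mem_of_ne_nil _ hf with ⟨x, hx⟩
        have hm := List.mem_filter.mp hx
        exact ⟨x, hm.1, by simpa using hm.2⟩
      simp [hf, h1, hop', hex']

-- on an operator-free sentinel, A's core is empty and B's is the raw remainder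
lemma pvAcore_of_no_op (l : List Char) (h : ∀ c ∈ l, pvOp c = false) : pvAcore l = [] := by
  rw [pvAcore]
  simp [(pv_mathIndex_nil_iff l).mpr h]

-- ===== VERDICT (by name: the statement is the Claim_ definition above) =====
theorem my_splits_bool_spec : Claim_equal_my_splits_bool := by
  intro s _
  unfold Spec_my_splits_bool my_splits_bool_alt
  rw [pvA_eq_core]
  by_cases hany : ((pvSentinel s).any (fun ch => (PySem.Dict.get? pvNames ch).isSome)) = true
  · rw [if_neg (by simp [hany])]
    have hex : ∃ c ∈ pvSentinel s, pvOp c = true := by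
      obtain ⟨c, hc, hc2⟩ := List.any_eq_true.mp hany
      exact ⟨c, hc, by rwa [pv_names_isSome] at hc2⟩
    exact pv_core_eq (pvSentinel s) hex
  · rw [if_pos (by simpa using hany)]
    refine pvAcore_of_no_op _ (fun c hc => ?_)
    have := fun h => hany (List.any_eq_true.mpr ⟨c, hc, h⟩)
    rw [← pv_names_isSome]
    simpa using this
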